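-- pv_equiv track=rewrite | github.com/dakaeng/Algorithm | 백준/Silver/1972. 놀라운 문자열/놀라운 문자열.py | surprise
-- ===== SOURCE A (Python) =====
-- def surprise(string) :
--   for d in range(len(string)-2) :  # (N-2)쌍은 한 개이므로 굳이 고려할 필요 없음
--     dic = {}
--     for i in range(len(string)-d-1) :
--       temp = string[i] + string[i+d+1]
--       if temp in dic :
--         dic[temp] += 1
--       else :
--         dic[temp] = 1
--     for i in dic :
--       if dic[i] >= 2 :
--         return False
--   return True
-- ===== SOURCE B (Python) =====
-- def surprise(string):
--     # A repeated gap-d pair is exactly two positions i < j with string[i] == string[j]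
--     # whose character equality recurs at some common positive offset t (= d+1) with j+t < n.
--     # So: enumerate position pairs with equal characters and scan offsets, no gap loop,
--     # no dict/set of pair strings at all.
--     n = len(string)
--     for i in range(n):
--         for j in range(i + 1, n):
--             if string[i] == string[j]:
--                 for t in range(1, n - j):
--                     if string[i + t] == string[j + t]:
--                         return False
--     return True
-- ===== Notes on version B (the rewrite author's own statement) =====
-- stated objective: alternative
-- what changed: B drops A's gap loop and its per-gap dict of pair counts entirely: it enumerates pairs of positions (i,j) with equal characters and scans positive offsets t for a second coinciding character (a repeated gap-d pair is exactly such a configuration with t = d+1), returning False at the first hit instead of finishing a whole gap's count dict and then scanning it.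
import Mathlib
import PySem

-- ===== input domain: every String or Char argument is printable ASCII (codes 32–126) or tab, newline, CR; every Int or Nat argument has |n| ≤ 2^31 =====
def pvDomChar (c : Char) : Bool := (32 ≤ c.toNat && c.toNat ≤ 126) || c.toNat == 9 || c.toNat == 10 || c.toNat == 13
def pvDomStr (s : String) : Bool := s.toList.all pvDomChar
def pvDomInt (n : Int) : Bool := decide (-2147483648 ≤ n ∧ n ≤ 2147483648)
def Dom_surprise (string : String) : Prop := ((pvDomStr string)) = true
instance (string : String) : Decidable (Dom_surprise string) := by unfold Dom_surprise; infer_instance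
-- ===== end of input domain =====

-- B replaces A's gap-by-gap dict-of-pair-counts scan by a direct search over pairs of
-- positions with equal characters, scanning offsets for a second coincidence (alternative
-- algorithm, same result).

-- ===== PORT A =====
-- inner counting loop: for i in range(len-d-1): temp = s[i]+s[i+d+1]; if temp in dic: dic[temp]+=1 else dic[temp]=1
-- (the 2-char string temp is represented by its list of characters; indexing is in range so pyGetD is exact)
def surpriseDict (cs : List Char) (d : Int) : PySem.Dict (List Char) Int :=
  (PySem.List.pyRange 0 ((cs.length : Int) - d - 1) 1).foldl
    (fun dic i =>
      let temp := [PySem.List.pyGetD cs i ' ', PySem.List.pyGetD cs (i + d + 1) ' ']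
      if dic.contains temp then dic.insert temp (dic.getD temp 0 + 1)
      else dic.insert temp 1)
    PySem.Dict.empty

-- outer loop over d, with the scan 'for i in dic: if dic[i] >= 2: return False'
-- (dic[i] for a key i of dic is its stored value: getD with default 0 is exact here)
def surpriseGaps (cs : List Char) : List Int → Bool
  | [] => true
  | d :: rest =>
      let dic := surpriseDict cs d
      if dic.keys.any (fun k => decide ((2 : Int) ≤ dic.getD k 0)) then false
      else surpriseGaps cs rest

def surprise (string : String) : Bool :=
  surpriseGaps string.toList (PySem.List.pyRange 0 ((string.toList.length : Int) - 2) 1)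

-- ===== PORT B =====
-- innermost loop: for t in range(1, n - j): if string[i+t] == string[j+t]: return False
def altOffsets (cs : List Char) (i j : Int) : List Int → Bool
  | [] => true
  | t :: rest =>
      if PySem.List.pyGetD cs (i + t) ' ' == PySem.List.pyGetD cs (j + t) ' ' then false
      else altOffsets cs i j rest

-- middle loop: for j in range(i+1, n): if string[i] == string[j]: (inner loop may return False)
def altPartners (cs : List Char) (i : Int) : List Int → Bool
  | [] => true
  | j :: rest =>
      if PySem.List.pyGetD cs i ' ' == PySem.List.pyGetD cs j ' ' then
        if altOffsets cs i j (PySem.List.pyRange 1 ((cs.length : Int) - j) 1) then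
          altPartners cs i rest
        else false
      else altPartners cs i rest

-- outer loop: for i in range(n)
def altPositions (cs : List Char) : List Int → Bool
  | [] => true
  | i :: rest =>
      if altPartners cs i (PySem.List.pyRange (i + 1) (cs.length : Int) 1) then
        altPositions cs rest
      else false

def surprise_alt (string : String) : Bool :=
  let cs := string.toList
  altPositions cs (PySem.List.pyRange 0 (cs.length : Int) 1)

-- ===== PRECONDITION & SPEC =====
def Spec_surprise (string : String) (out : Bool) : Prop := out = surprise_alt string
instance (string : String) (out : Bool) : Decidable (Spec_surprise string out) := by unfold Spec_surprise; infer_instance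

-- ===== CLAIM (what is proved, stated in full; the proofs are below) =====
def Claim_equal_surprise : Prop := ∀ (string : String), Dom_surprise string → Spec_surprise string (surprise string)

-- ===== LEMMAS AND PROOFS =====

-- the list of pairs of gap d, in index order
def gapPairs (cs : List Char) (d : Int) : List (List Char) :=
  (PySem.List.pyRange 0 ((cs.length : Int) - d - 1) 1).map
    (fun i => [PySem.List.pyGetD cs i ' ', PySem.List.pyGetD cs (i + d + 1) ' '])

-- the common characterisation: an equal-character position pair whose equality recurs at offset t
def Collides (cs : List Char) : Prop :=
  ∃ i j t : Int, 0 ≤ i ∧ i < j ∧ 1 ≤ t ∧ j + t < (cs.length : Int) ∧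
    PySem.List.pyGetD cs i ' ' = PySem.List.pyGetD cs j ' ' ∧
    PySem.List.pyGetD cs (i + t) ' ' = PySem.List.pyGetD cs (j + t) ' '

theorem getD_eq_zero_of_not_contains {κ : Type} [BEq κ] [LawfulBEq κ]
    (d : PySem.Dict κ Int) (k : κ) (h : d.contains k = false) : d.getD k 0 = 0 := by
  have hf : d.items.find? (fun p => p.1 == k) = none := by
    rw [List.find?_eq_none]
    intro p hp
    have := (List.any_eq_false.mp h) p hp
    simpa using this
  simp [PySem.Dict.getD, PySem.Dict.get?, hf]

theorem surpriseDict_eq_counter (cs : List Char) (d : Int) :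
    surpriseDict cs d = PySem.Dict.counter (gapPairs cs d) := by
  unfold surpriseDict gapPairs
  rw [← PySem.Dict.foldl_insert_getD_add_one_eq_counter, List.foldl_map]
  apply List.foldl_ext
  intro dic i _
  by_cases h : dic.contains [PySem.List.pyGetD cs i ' ', PySem.List.pyGetD cs (i + d + 1) ' '] = true
  · simp [h]
  · have h' := eq_false_of_ne_true h
    simp [h', getD_eq_zero_of_not_contains _ _ h']

-- A's per-gap verdict: some pair occurs at least twice ↔ the pair list is not Nodup
theorem dict_scan_iff (cs : List Char) (d : Int) :
    ((surpriseDict cs d).keys.any (fun k => decide ((2 : Int) ≤ (surpriseDict cs d).getD k 0)) = true)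
      ↔ ¬ (gapPairs cs d).Nodup := by
  rw [surpriseDict_eq_counter, PySem.Dict.keys_counter]
  constructor
  · intro h hn
    obtain ⟨k, hk, h2⟩ := List.any_eq_true.mp h
    rw [PySem.Dict.getD_counter] at h2
    simp only [decide_eq_true_eq] at h2
    have h1 := (List.nodup_iff_count_le_one.mp hn) k
    omega
  · intro hn
    obtain ⟨k, h2⟩ : ∃ k, 2 ≤ (gapPairs cs d).count k := by
      by_contra hc
      push Not at hc
      exact hn (List.nodup_iff_count_le_one.mpr (fun a => by have := hc a; omega))
    refine List.any_eq_true.mpr ⟨k, ?_, ?_⟩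
    · rw [PySem.Set.mem_ofList]
      exact List.count_pos_iff.mp (by omega)
    · rw [PySem.Dict.getD_counter]
      simp only [decide_eq_true_eq]
      exact_mod_cast h2

-- A = true ↔ every listed gap has pairwise-distinct pairs
theorem surpriseGaps_iff (cs : List Char) (ds : List Int) :
    surpriseGaps cs ds = true ↔ ∀ d ∈ ds, (gapPairs cs d).Nodup := by
  induction ds with
  | nil => simp [surpriseGaps]
  | cons d rest ih =>
    show (if ((surpriseDict cs d).keys.any (fun k => decide ((2 : Int) ≤ (surpriseDict cs d).getD k 0))) = true
            then false else surpriseGaps cs rest) = true ↔ _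
    by_cases h : ((surpriseDict cs d).keys.any (fun k => decide ((2 : Int) ≤ (surpriseDict cs d).getD k 0))) = true
    · rw [if_pos h]
      have := (dict_scan_iff cs d).mp h
      simp only [Bool.false_eq_true, false_iff]
      intro hall
      exact this (hall d (List.mem_cons_self))
    · rw [if_neg h]
      have hnd : (gapPairs cs d).Nodup := by
        by_contra hc
        exact h ((dict_scan_iff cs d).mpr hc)
      rw [ih]
      constructor
      · intro hall e he
        rcases List.mem_cons.mp he with rfl | he'
        · exact hnd
        · exact hall e he'
      · intro hall e he
        exact hall e (List.mem_cons_of_mem _ he)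

-- Nodup of a map over range(0, m) as a statement about Int indices
theorem nodup_map_pyRange_iff {α : Type} [DecidableEq α] (f : Int → α) (m : Int) :
    ((PySem.List.pyRange 0 m 1).map f).Nodup ↔
      ∀ i j : Int, 0 ≤ i → i < j → j < m → f i ≠ f j := by
  rw [List.Nodup, List.pairwise_map, List.pairwise_iff_getElem]
  constructor
  · intro h i j hi hij hjm
    have hk : i.toNat < (PySem.List.pyRange 0 m 1).length := by
      rw [PySem.List.length_pyRange_one]; omega
    have hl : j.toNat < (PySem.List.pyRange 0 m 1).length := by
      rw [PySem.List.length_pyRange_one]; omega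
    have := h i.toNat j.toNat hk hl (by omega)
    rw [PySem.List.getElem_pyRange_one, PySem.List.getElem_pyRange_one] at this
    have hi' : (0 : Int) + i.toNat = i := by omega
    have hj' : (0 : Int) + j.toNat = j := by omega
    rw [hi', hj'] at this
    exact this
  · intro h k l hk hl hkl
    rw [PySem.List.getElem_pyRange_one, PySem.List.getElem_pyRange_one]
    have hlb : (l : Int) < m := by
      have := hl; rw [PySem.List.length_pyRange_one] at this; omega
    exact h (0 + k) (0 + l) (by omega) (by omega) (by omega)

-- A = true ↔ no collision
theorem surpriseA_iff (cs : List Char) :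
    surpriseGaps cs (PySem.List.pyRange 0 ((cs.length : Int) - 2) 1) = true ↔ ¬ Collides cs := by
  rw [surpriseGaps_iff]
  constructor
  · rintro hall ⟨i, j, t, hi, hij, ht, hjt, h1, h2⟩
    have hd : (t - 1) ∈ PySem.List.pyRange 0 ((cs.length : Int) - 2) 1 := by
      rw [PySem.List.mem_pyRange_one]; omega
    have hnd := hall (t - 1) hd
    rw [gapPairs, nodup_map_pyRange_iff] at hnd
    have := hnd i j hi hij (by omega)
    apply this
    have e1 : i + (t - 1) + 1 = i + t := by ring
    have e2 : j + (t - 1) + 1 = j + t := by ring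
    rw [e1, e2, h1, h2]
  · intro hnc d hd
    rw [PySem.List.mem_pyRange_one] at hd
    rw [gapPairs, nodup_map_pyRange_iff]
    intro i j hi hij hjm heq
    simp only [List.cons.injEq, and_true] at heq
    apply hnc
    refine ⟨i, j, d + 1, hi, hij, by omega, by omega, heq.1, ?_⟩
    have e1 : i + (d + 1) = i + d + 1 := by ring
    have e2 : j + (d + 1) = j + d + 1 := by ring
    rw [e1, e2]
    exact heq.2

-- B-side loop characterisations
theorem altOffsets_iff (cs : List Char) (i j : Int) (ts : List Int) :
    altOffsets cs i j ts = true ↔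
      ∀ t ∈ ts, PySem.List.pyGetD cs (i + t) ' ' ≠ PySem.List.pyGetD cs (j + t) ' ' := by
  induction ts with
  | nil => simp [altOffsets]
  | cons t rest ih =>
    show (if PySem.List.pyGetD cs (i + t) ' ' == PySem.List.pyGetD cs (j + t) ' ' then false
          else altOffsets cs i j rest) = true ↔ _
    by_cases h : PySem.List.pyGetD cs (i + t) ' ' = PySem.List.pyGetD cs (j + t) ' '
    · simp [h]
    · rw [if_neg (by simpa using h), ih]
      simp [h]

theorem altPartners_iff (cs : List Char) (i : Int) (js : List Int) :
    altPartners cs i js = true ↔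
      ∀ j ∈ js, PySem.List.pyGetD cs i ' ' = PySem.List.pyGetD cs j ' ' →
        altOffsets cs i j (PySem.List.pyRange 1 ((cs.length : Int) - j) 1) = true := by
  induction js with
  | nil => simp [altPartners]
  | cons j rest ih =>
    show (if PySem.List.pyGetD cs i ' ' == PySem.List.pyGetD cs j ' ' then
            if altOffsets cs i j (PySem.List.pyRange 1 ((cs.length : Int) - j) 1) then
              altPartners cs i rest
            else false
          else altPartners cs i rest) = true ↔ _
    by_cases h : PySem.List.pyGetD cs i ' ' = PySem.List.pyGetD cs j ' '
    · rw [if_pos (by simpa using h)]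
      by_cases ho : altOffsets cs i j (PySem.List.pyRange 1 ((cs.length : Int) - j) 1) = true
      · rw [if_pos ho, ih]
        constructor
        · intro hall k hk hke
          rcases List.mem_cons.mp hk with rfl | hk'
          · exact ho
          · exact hall k hk' hke
        · intro hall k hk hke
          exact hall k (List.mem_cons_of_mem _ hk) hke
      · rw [if_neg ho]
        simp only [Bool.false_eq_true, false_iff]
        intro hall
        exact ho (hall j List.mem_cons_self h)
    · rw [if_neg (by simpa using h), ih]
      constructor
      · intro hall k hk hke
        rcases List.mem_cons.mp hk with rfl | hk'
        · exact absurd hke h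
        · exact hall k hk' hke
      · intro hall k hk hke
        exact hall k (List.mem_cons_of_mem _ hk) hke

theorem altPositions_iff (cs : List Char) (is : List Int) :
    altPositions cs is = true ↔
      ∀ i ∈ is, altPartners cs i (PySem.List.pyRange (i + 1) (cs.length : Int) 1) = true := by
  induction is with
  | nil => simp [altPositions]
  | cons i rest ih =>
    show (if altPartners cs i (PySem.List.pyRange (i + 1) (cs.length : Int) 1) then
            altPositions cs rest
          else false) = true ↔ _
    by_cases h : altPartners cs i (PySem.List.pyRange (i + 1) (cs.length : Int) 1) = true
    · rw [if_pos h, ih]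
      constructor
      · intro hall k hk
        rcases List.mem_cons.mp hk with rfl | hk'
        · exact h
        · exact hall k hk'
      · intro hall k hk
        exact hall k (List.mem_cons_of_mem _ hk)
    · rw [if_neg h]
      simp only [Bool.false_eq_true, false_iff]
      intro hall
      exact h (hall i List.mem_cons_self)

-- B = true ↔ no collision
theorem surpriseB_iff (cs : List Char) :
    altPositions cs (PySem.List.pyRange 0 (cs.length : Int) 1) = true ↔ ¬ Collides cs := by
  rw [altPositions_iff]
  constructor
  · rintro hall ⟨i, j, t, hi, hij, ht, hjt, h1, h2⟩
    have hi' : i ∈ PySem.List.pyRange 0 (cs.length : Int) 1 := by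
      rw [PySem.List.mem_pyRange_one]; omega
    have hp := (altPartners_iff cs i _).mp (hall i hi') j
      (by rw [PySem.List.mem_pyRange_one]; omega) h1
    have := (altOffsets_iff cs i j _).mp hp t (by rw [PySem.List.mem_pyRange_one]; omega)
    exact this h2
  · intro hnc i hi
    rw [PySem.List.mem_pyRange_one] at hi
    rw [altPartners_iff]
    intro j hj h1
    rw [PySem.List.mem_pyRange_one] at hj
    rw [altOffsets_iff]
    intro t ht h2
    rw [PySem.List.mem_pyRange_one] at ht
    exact hnc ⟨i, j, t, hi.1, by omega, by omega, by omega, h1, h2⟩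

-- ===== VERDICT (by name: the statement is the Claim_ definition above) =====
theorem surprise_spec : Claim_equal_surprise := by
  intro string _
  unfold Spec_surprise surprise surprise_alt
  have hA := surpriseA_iff string.toList
  have hB := surpriseB_iff string.toList
  cases hb : altPositions string.toList (PySem.List.pyRange 0 (string.toList.length : Int) 1) with
  | true => exact hA.mpr (hB.mp hb)
  | false =>
    cases hAv : surpriseGaps string.toList
        (PySem.List.pyRange 0 ((string.toList.length : Int) - 2) 1) with
    | false => rfl
    | true =>
      have hBt := hB.mpr (hA.mp hAv)
      rw [hBt] at hb
      exact absurd hb (by simp)
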